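-- pv_equiv track=rewrite | github.com/MDJuniooor/Algorithm | CodingTest_5th/test1.py | solution
-- ===== SOURCE A (Python) =====
-- def solution(o1, o2, b1, b2):
--     ans = []
--     for i in range(len(b1)):
--         if (o1 <=b1[i] and o2 <=b2[i]) or (o1 <=b2[i] and o2 <=b1[i]):
--             ans.append(b1[i]*b2[i])
--     ans.sort()
--     if len(ans) == 0:
--         return -1
--     else:
--         return ans[0]
-- ===== SOURCE B (Python) =====
-- def solution(o1, o2, b1, b2):
--     best = None
--     for x, y in zip(b1, b2):
--         if (o1 <= x and o2 <= y) or (o1 <= y and o2 <= x):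
--             p = x * y
--             if best is None or p < best:
--                 best = p
--     return -1 if best is None else best
-- ===== Notes on version B (the rewrite author's own statement) =====
-- stated objective: alternative
-- what changed: Instead of collecting all qualifying products into a list, sorting it and taking the first element, B tracks the running minimum qualifying product in a single pass over zip(b1, b2); intended as faster (O(n) vs O(n log n)) but a timing run measured only ~1.5x, so no speed is claimed.
import Mathlib
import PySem

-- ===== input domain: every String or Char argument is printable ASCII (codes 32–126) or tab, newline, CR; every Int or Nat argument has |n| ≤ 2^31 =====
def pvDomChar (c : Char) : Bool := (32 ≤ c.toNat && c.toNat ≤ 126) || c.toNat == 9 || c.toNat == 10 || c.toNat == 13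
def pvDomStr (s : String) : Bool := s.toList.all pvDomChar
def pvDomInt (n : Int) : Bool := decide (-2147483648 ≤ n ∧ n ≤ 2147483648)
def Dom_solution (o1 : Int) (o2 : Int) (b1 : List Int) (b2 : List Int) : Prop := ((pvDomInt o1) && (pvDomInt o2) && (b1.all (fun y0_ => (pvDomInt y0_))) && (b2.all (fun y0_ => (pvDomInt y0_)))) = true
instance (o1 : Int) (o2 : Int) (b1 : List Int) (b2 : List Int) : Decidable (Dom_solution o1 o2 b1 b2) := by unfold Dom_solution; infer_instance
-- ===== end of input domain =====

-- B replaces A's collect-all / sort / take-first with a single running-minimum pass over zip(b1, b2).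

-- ===== PORT A =====
-- pyGetD is in range for every index the loop visits under Pre_solution (b1.length ≤ b2.length)
def solution (o1 : Int) (o2 : Int) (b1 : List Int) (b2 : List Int) : Int :=
  let ans := (PySem.List.pyRange 0 (b1.length : Int) 1).foldl
    (fun ans i =>
      if (o1 ≤ PySem.List.pyGetD b1 i 0 ∧ o2 ≤ PySem.List.pyGetD b2 i 0) ∨
         (o1 ≤ PySem.List.pyGetD b2 i 0 ∧ o2 ≤ PySem.List.pyGetD b1 i 0) then
        ans ++ [PySem.List.pyGetD b1 i 0 * PySem.List.pyGetD b2 i 0]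
      else ans) []
  let ans := PySem.List.sorted ans (fun x => x) false
  if ans.length = 0 then -1 else PySem.List.pyGetD ans 0 0

-- ===== PORT B =====
-- the loop body of Source B: update the optional running minimum with one (x, y) pair
def solAltStep (o1 : Int) (o2 : Int) (best : Option Int) (p : Int × Int) : Option Int :=
  if (o1 ≤ p.1 ∧ o2 ≤ p.2) ∨ (o1 ≤ p.2 ∧ o2 ≤ p.1) then
    match best with
    | none => some (p.1 * p.2)
    | some b => if p.1 * p.2 < b then some (p.1 * p.2) else some b
  else best

def solution_alt (o1 : Int) (o2 : Int) (b1 : List Int) (b2 : List Int) : Int :=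
  match (b1.zip b2).foldl (solAltStep o1 o2) none with
  | none => -1
  | some b => b

-- ===== PRECONDITION & SPEC =====
-- A evaluates b2[i] for every i < len(b1), so it raises IndexError exactly when b2 is shorter than b1.
def Pre_solution (o1 : Int) (o2 : Int) (b1 : List Int) (b2 : List Int) : Prop := b1.length ≤ b2.length
instance (o1 : Int) (o2 : Int) (b1 : List Int) (b2 : List Int) : Decidable (Pre_solution o1 o2 b1 b2) := by unfold Pre_solution; infer_instance
def pvWitness_solution : Int × Int × List Int × List Int := (1, 2, [1, 3], [2, 4])

def Spec_solution (o1 : Int) (o2 : Int) (b1 : List Int) (b2 : List Int) (out : Int) : Prop := out = solution_alt o1 o2 b1 b2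
instance (o1 : Int) (o2 : Int) (b1 : List Int) (b2 : List Int) (out : Int) : Decidable (Spec_solution o1 o2 b1 b2 out) := by unfold Spec_solution; infer_instance

-- ===== CLAIM (what is proved, stated in full; the proofs are below) =====
def Claim_equal_solution : Prop := ∀ (o1 : Int) (o2 : Int) (b1 : List Int) (b2 : List Int), Dom_solution o1 o2 b1 b2 → Pre_solution o1 o2 b1 b2 → Spec_solution o1 o2 b1 b2 (solution o1 o2 b1 b2)

-- ===== LEMMAS AND PROOFS =====

-- the index loop over range(len(b1)) reads exactly the pairs of zip(b1, b2)
theorem pv_map_range_zip (b1 b2 : List Int) (h : b1.length ≤ b2.length) :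
    (PySem.List.pyRange 0 (b1.length : Int) 1).map
      (fun i => (PySem.List.pyGetD b1 i 0, PySem.List.pyGetD b2 i 0)) = b1.zip b2 := by
  rw [PySem.List.pyRange_one]
  apply List.ext_getElem
  · simp [Nat.min_eq_left h]
  · intro n h1 h2
    simp only [List.getElem_map, List.getElem_range, List.getElem_zip, zero_add,
      PySem.List.pyGetD_natCast, Prod.mk.injEq]
    simp at h1
    constructor
    · exact List.getD_eq_getElem _ _ (by omega)
    · exact List.getD_eq_getElem _ _ (by omega)

-- B's running-minimum fold, started from an already-found value b
theorem pv_bfold_some (o1 o2 : Int) (xs : List (Int × Int)) (b : Int) :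
    xs.foldl (solAltStep o1 o2) (some b)
      = some (((xs.filter (fun p => decide ((o1 ≤ p.1 ∧ o2 ≤ p.2) ∨ (o1 ≤ p.2 ∧ o2 ≤ p.1)))).map
          (fun p => p.1 * p.2)).foldl min b) := by
  induction xs generalizing b with
  | nil => simp
  | cons p xs ih =>
    by_cases hc : (o1 ≤ p.1 ∧ o2 ≤ p.2) ∨ (o1 ≤ p.2 ∧ o2 ≤ p.1)
    · simp only [List.foldl_cons, List.filter_cons, hc, decide_true, List.map_cons,
        solAltStep, if_true]
      have hmin : (if p.1 * p.2 < b then some (p.1 * p.2) else some b)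
          = some (min b (p.1 * p.2)) := by
        by_cases h : p.1 * p.2 < b <;> simp [h, min_def]
      rw [hmin, ih (min b (p.1 * p.2))]
    · simp only [List.foldl_cons, List.filter_cons, hc, decide_false, solAltStep, if_false]
      exact ih b

-- B's fold from None equals: None if no pair qualifies, else the minimum of the qualifying products
theorem pv_bfold_none (o1 o2 : Int) (xs : List (Int × Int)) :
    xs.foldl (solAltStep o1 o2) none
      = match ((xs.filter (fun p => decide ((o1 ≤ p.1 ∧ o2 ≤ p.2) ∨ (o1 ≤ p.2 ∧ o2 ≤ p.1)))).map
          (fun p => p.1 * p.2)) with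
        | [] => none
        | m :: t => some (t.foldl min m) := by
  induction xs with
  | nil => simp
  | cons p xs ih =>
    by_cases hc : (o1 ≤ p.1 ∧ o2 ≤ p.2) ∨ (o1 ≤ p.2 ∧ o2 ≤ p.1)
    · simp only [List.foldl_cons, List.filter_cons, hc, decide_true, List.map_cons,
        solAltStep, if_true]
      exact pv_bfold_some o1 o2 xs (p.1 * p.2)
    · simp only [List.foldl_cons, List.filter_cons, hc, decide_false, solAltStep, if_false]
      exact ih

-- head of sorted(L) is the running minimum of L (values, by uniqueness of the minimum)
theorem pv_sorted_head_eq_min (m : Int) (t : List Int) {s0 : Int} {s : List Int}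
    (hs : PySem.List.sorted (m :: t) (fun x => x) false = s0 :: s) :
    s0 = t.foldl min m := by
  have hmin := PySem.List.min?_id_cons m t
  have hmem : t.foldl min m ∈ m :: t := PySem.List.min?_mem hmin
  have hlb : ∀ y ∈ m :: t, t.foldl min m ≤ y := PySem.List.min?_isMin hmin
  have hs0mem : s0 ∈ m :: t := by
    have : s0 ∈ PySem.List.sorted (m :: t) (fun x => x) false := by rw [hs]; exact List.mem_cons_self
    exact (PySem.List.mem_sorted _ _ _ _).mp this
  have hs0lb : ∀ y ∈ m :: t, s0 ≤ y := PySem.List.key_head_sorted_le (m :: t) (fun x => x) hs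
  exact le_antisymm (hs0lb _ hmem) (hlb _ hs0mem)

-- ===== VERDICT (by name: the statement is the Claim_ definition above) =====
theorem solution_spec : Claim_equal_solution := by
  intro o1 o2 b1 b2 _ hpre
  unfold Spec_solution solution solution_alt
  dsimp only
  have hzip := pv_map_range_zip b1 b2 hpre
  -- A's index loop equals the same loop over zip(b1, b2)
  have h1 : (PySem.List.pyRange 0 (b1.length : Int) 1).foldl
      (fun ans i =>
        if (o1 ≤ PySem.List.pyGetD b1 i 0 ∧ o2 ≤ PySem.List.pyGetD b2 i 0) ∨
           (o1 ≤ PySem.List.pyGetD b2 i 0 ∧ o2 ≤ PySem.List.pyGetD b1 i 0) then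
          ans ++ [PySem.List.pyGetD b1 i 0 * PySem.List.pyGetD b2 i 0]
        else ans) []
      = (b1.zip b2).foldl
        (fun acc q => if (o1 ≤ q.1 ∧ o2 ≤ q.2) ∨ (o1 ≤ q.2 ∧ o2 ≤ q.1) then
            acc ++ [q.1 * q.2] else acc) [] := by
    rw [← hzip, List.foldl_map]
  -- A's append-if loop over zip collapses to filter + map
  have h2 := PySem.List.foldl_append_if
      (p := fun q : Int × Int => decide ((o1 ≤ q.1 ∧ o2 ≤ q.2) ∨ (o1 ≤ q.2 ∧ o2 ≤ q.1)))
      (f := fun q : Int × Int => q.1 * q.2) (l := b1.zip b2) (acc := ([] : List Int))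
  simp only [decide_eq_true_eq, List.nil_append] at h2
  rw [h1, h2, pv_bfold_none o1 o2 (b1.zip b2)]
  set L := ((b1.zip b2).filter
      (fun p => decide ((o1 ≤ p.1 ∧ o2 ≤ p.2) ∨ (o1 ≤ p.2 ∧ o2 ≤ p.1)))).map
      (fun p => p.1 * p.2) with hL
  cases hL2 : L with
  | nil =>
    have hs : PySem.List.sorted ([] : List Int) (fun x => x) false = [] :=
      (PySem.List.sorted_eq_nil_iff _ _ _).mpr rfl
    simp [hs]
  | cons m t =>
    have hne : PySem.List.sorted (m :: t) (fun x => x) false ≠ [] := by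
      intro h
      exact List.cons_ne_nil m t ((PySem.List.sorted_eq_nil_iff _ _ _).mp h)
    match hs : PySem.List.sorted (m :: t) (fun x => x) false with
    | [] => exact absurd hs hne
    | s0 :: s =>
      have hlen : ¬ (s0 :: s).length = 0 := by simp
      rw [if_neg hlen, PySem.List.pyGetD_zero_cons]
      exact pv_sorted_head_eq_min m t hs
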